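-- pv_equiv track=rewrite | github.com/shivamkayal-star/MeetingNotes | core/parsing.py | ensure_bcn_second
-- ===== SOURCE A (Python) =====
-- from typing import List, Dict, Optional, Tuple
--
-- def ensure_bcn_second(participants: List[str], default_second="BCN Carbon Team") -> List[str]:
--     names = [p for p in participants if p]
--     if not any(p.lower() == default_second.lower() for p in names):
--         names.append(default_second)
--     others = [p for p in names if p.lower() != default_second.lower()]
--     result = []
--     if others:
--         result.append(others[0]); result.append(default_second); result.extend(others[1:])
--     else:
--         result = [default_second]
--     dedup = []; seen = set()
--     for p in result:
--         k = p.lower()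
--         if k not in seen:
--             seen.add(k); dedup.append(p)
--     return dedup
-- ===== SOURCE B (Python) =====
-- def ensure_bcn_second(participants, default_second="BCN Carbon Team"):
--     dl = default_second.lower()
--     seen = set()
--     uniques = []
--     for p in participants:
--         if not p:
--             continue
--         k = p.lower()
--         if k == dl or k in seen:
--             continue
--         seen.add(k)
--         uniques.append(p)
--     if not uniques:
--         return [default_second]
--     return [uniques[0], default_second] + uniques[1:]
-- ===== Notes on version B (the rewrite author's own statement) =====
-- stated objective: simpler
-- what changed: B replaces A's four staged passes (filter truthy, conditionally append default, exclude default, dedup the assembled result) with one pass that collects the unique non-default names and then splices default_second in after the first one, dropping A's dead append-if-absent branch; it also lowercases default_second once instead of once per element.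
import Mathlib
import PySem

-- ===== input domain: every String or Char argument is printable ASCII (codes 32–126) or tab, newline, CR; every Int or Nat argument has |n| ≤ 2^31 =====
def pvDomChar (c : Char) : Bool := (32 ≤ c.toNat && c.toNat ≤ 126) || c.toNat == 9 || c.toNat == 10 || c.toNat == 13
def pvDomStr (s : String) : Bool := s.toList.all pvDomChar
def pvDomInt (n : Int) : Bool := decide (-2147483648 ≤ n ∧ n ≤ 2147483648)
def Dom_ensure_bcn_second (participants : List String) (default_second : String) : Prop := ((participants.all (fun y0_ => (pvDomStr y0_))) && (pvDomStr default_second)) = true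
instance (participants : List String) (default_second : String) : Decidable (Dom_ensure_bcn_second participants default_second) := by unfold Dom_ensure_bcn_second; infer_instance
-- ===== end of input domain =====

-- B fuses A's filter/append/exclude/dedup stages into one pass that collects the unique
-- non-default names, then inserts default_second after the first one (objective: simpler).

-- ===== PORT A =====
def ensure_bcn_second (participants : List String) (default_second : String) : List String :=
  let names := participants.filter (fun p => !(p == ""))
  let names := if !(names.any (fun p => PySem.Str.lower p == PySem.Str.lower default_second))
    then names ++ [default_second] else names
  let others := names.filter (fun p => !(PySem.Str.lower p == PySem.Str.lower default_second))
  let result := match others with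
    | [] => [default_second]
    | o0 :: rest => o0 :: default_second :: rest   -- result = [others[0], default_second] + others[1:]
  (result.foldl (fun (st : List String × PySem.Set String) p =>
      let k := PySem.Str.lower p
      if st.2.contains k then st else (st.1 ++ [p], PySem.Set.add st.2 k))
    ([], PySem.Set.empty)).1

-- ===== PORT B =====
def ensure_bcn_second_alt (participants : List String) (default_second : String) : List String :=
  let dl := PySem.Str.lower default_second
  let uniques := (participants.foldl (fun (st : PySem.Set String × List String) p =>
      if p == "" then st
      else
        let k := PySem.Str.lower p
        if k == dl || st.1.contains k then st
        else (PySem.Set.add st.1 k, st.2 ++ [p]))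
    (PySem.Set.empty, [])).2
  match uniques with
  | [] => [default_second]
  | u :: rest => u :: default_second :: rest

-- ===== PRECONDITION & SPEC =====
def Spec_ensure_bcn_second (participants : List String) (default_second : String) (out : List String) : Prop := out = ensure_bcn_second_alt participants default_second
instance (participants : List String) (default_second : String) (out : List String) : Decidable (Spec_ensure_bcn_second participants default_second out) := by unfold Spec_ensure_bcn_second; infer_instance

-- ===== CLAIM (what is proved, stated in full; the proofs are below) =====
def Claim_equal_ensure_bcn_second : Prop := ∀ (participants : List String) (default_second : String), Dom_ensure_bcn_second participants default_second → Spec_ensure_bcn_second participants default_second (ensure_bcn_second participants default_second)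

-- ===== LEMMAS AND PROOFS =====

-- case-insensitive first-occurrence dedup against a seen-set, as a pure recursion
def pvDD (l : List String) (s : PySem.Set String) : List String :=
  match l with
  | [] => []
  | p :: t =>
    let k := PySem.Str.lower p
    if s.contains k then pvDD t s else p :: pvDD t (PySem.Set.add s k)

theorem pvOrSwap (a b c : Bool) : ((a || b) || c) = ((a || c) || b) := by
  cases a <;> cases b <;> cases c <;> rfl

theorem pvContains_empty (k : String) :
    (PySem.Set.empty : PySem.Set String).contains k = false := rfl

theorem pvContains_add (s : PySem.Set String) (a k : String) :
    (PySem.Set.add s a).contains k = (s.contains k || k == a) := by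
  simp only [PySem.Set.add, PySem.Set.contains, List.contains_eq_mem]
  by_cases hk : k = a
  · subst hk
    split_ifs with h <;> simp_all
  · split_ifs with h <;> simp [hk]

theorem pvDD_congr (l : List String) (s t : PySem.Set String)
    (h : ∀ k, s.contains k = t.contains k) : pvDD l s = pvDD l t := by
  induction l generalizing s t with
  | nil => rfl
  | cons p tl ih =>
    simp only [pvDD, h]
    split_ifs
    · exact ih s t h
    · exact congrArg _ (ih _ _ (by intro k; simp only [pvContains_add, h]))

theorem pvDD_drop (l : List String) (s : PySem.Set String) (d : String)
    (h : ∀ p ∈ l, (PySem.Str.lower p == d) = false) :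
    pvDD l (PySem.Set.add s d) = pvDD l s := by
  induction l generalizing s with
  | nil => rfl
  | cons p tl ih =>
    have hp : (PySem.Str.lower p == d) = false := h p (by simp)
    simp only [pvDD, pvContains_add, hp, Bool.or_false]
    split_ifs
    · exact ih s (fun q hq => h q (by simp [hq]))
    · refine congrArg _ ?_
      rw [pvDD_congr tl (PySem.Set.add (PySem.Set.add s d) (PySem.Str.lower p))
            (PySem.Set.add (PySem.Set.add s (PySem.Str.lower p)) d)
            (by intro k; simp only [pvContains_add]; exact pvOrSwap _ _ _)]
      exact ih _ (fun q hq => h q (by simp [hq]))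

theorem pvFoldA (l : List String) (acc : List String) (s : PySem.Set String) :
    (l.foldl (fun (st : List String × PySem.Set String) p =>
        let k := PySem.Str.lower p
        if st.2.contains k then st else (st.1 ++ [p], PySem.Set.add st.2 k))
      (acc, s)).1 = acc ++ pvDD l s := by
  induction l generalizing acc s with
  | nil => simp [pvDD]
  | cons p tl ih =>
    show (List.foldl _ (if s.contains (PySem.Str.lower p) = true then (acc, s)
        else (acc ++ [p], PySem.Set.add s (PySem.Str.lower p))) tl).1 = _
    by_cases h : s.contains (PySem.Str.lower p) = true
    · rw [if_pos h, ih]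
      simp only [pvDD, if_pos h]
    · rw [if_neg h, ih]
      simp only [pvDD, if_neg h, List.append_assoc, List.singleton_append]

theorem pvFoldB (dl : String) (l : List String) (s : PySem.Set String) (acc : List String) :
    (l.foldl (fun (st : PySem.Set String × List String) p =>
        if p == "" then st
        else
          let k := PySem.Str.lower p
          if k == dl || st.1.contains k then st
          else (PySem.Set.add st.1 k, st.2 ++ [p]))
      (s, acc)).2
    = acc ++ pvDD (l.filter (fun p => !(p == "") && !(PySem.Str.lower p == dl))) s := by
  induction l generalizing s acc with
  | nil => simp [pvDD]
  | cons p tl ih =>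
    simp only [List.foldl_cons, List.filter_cons]
    by_cases he : p = ""
    · have he' : (p == "") = true := by simp [he]
      rw [if_pos he', if_neg (by rw [he']; simp)]
      exact ih s acc
    · have he' : (p == "") = false := by simp [he]
      rw [if_neg (by rw [he']; simp)]
      by_cases hd : (PySem.Str.lower p == dl) = true
      · rw [if_pos (by rw [hd, Bool.true_or]), if_neg (by rw [hd]; simp)]
        exact ih s acc
      · have hd' : (PySem.Str.lower p == dl) = false := by simpa using hd
        by_cases hs : s.contains (PySem.Str.lower p) = true
        · rw [if_pos (by rw [hd', Bool.false_or]; exact hs),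
            if_pos (by rw [he', hd']; rfl), ih]
          simp only [pvDD, if_pos hs]
        · rw [if_neg (by rw [hd', Bool.false_or]; exact hs),
            if_pos (by rw [he', hd']; rfl), ih]
          simp only [pvDD, if_neg hs, List.append_assoc, List.singleton_append]

-- the common tail: insert d after the head (or alone if the list is empty)
def pvWrap (d : String) (l : List String) : List String :=
  match l with
  | [] => [d]
  | x :: r => x :: d :: r

theorem pvMain (d : String) (others : List String)
    (hmem : ∀ p ∈ others, (PySem.Str.lower p == PySem.Str.lower d) = false) :
    pvDD (pvWrap d others) PySem.Set.empty = pvWrap d (pvDD others PySem.Set.empty) := by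
  unfold pvWrap
  cases others with
  | nil => simp [pvDD]
  | cons x xs =>
    have hx : (PySem.Str.lower x == PySem.Str.lower d) = false := hmem x (by simp)
    have hdx : (PySem.Str.lower d == PySem.Str.lower x) = false := by
      rw [beq_eq_false_iff_ne] at hx ⊢
      exact fun e => hx e.symm
    simp only [pvDD, pvContains_empty, pvContains_add, hdx, Bool.false_eq_true, if_false,
      Bool.false_or]
    rw [pvDD_drop xs _ (PySem.Str.lower d) (fun q hq => hmem q (by simp [hq]))]

theorem ensure_bcn_second_eq (participants : List String) (default_second : String) :
    ensure_bcn_second participants default_second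
      = ensure_bcn_second_alt participants default_second := by
  simp only [ensure_bcn_second, ensure_bcn_second_alt]
  rw [pvFoldB, pvFoldA, List.nil_append, List.nil_append]
  have hothers :
      ((if !(((participants.filter (fun p => !(p == ""))).any
            (fun p => PySem.Str.lower p == PySem.Str.lower default_second)))
        then participants.filter (fun p => !(p == "")) ++ [default_second]
        else participants.filter (fun p => !(p == ""))).filter
          (fun p => !(PySem.Str.lower p == PySem.Str.lower default_second)))
      = participants.filter
          (fun p => !(p == "") && !(PySem.Str.lower p == PySem.Str.lower default_second)) := by
    split_ifs with h
    · simp only [List.filter_append, List.filter_filter]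
      simp only [beq_self_eq_true, Bool.not_true, List.filter_cons, Bool.false_eq_true,
        if_false, List.filter_nil, List.append_nil]
      exact List.filter_congr (fun a _ => Bool.and_comm _ _)
    · simp only [List.filter_filter]
      exact List.filter_congr (fun a _ => Bool.and_comm _ _)
  rw [hothers]
  have hm : ∀ p ∈ participants.filter
      (fun p => !(p == "") && !(PySem.Str.lower p == PySem.Str.lower default_second)),
      (PySem.Str.lower p == PySem.Str.lower default_second) = false := by
    intro p hp
    have h2 := ((Bool.and_eq_true _ _).mp (List.mem_filter.mp hp).2).2
    revert h2
    cases (PySem.Str.lower p == PySem.Str.lower default_second) <;> simp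
  exact pvMain default_second _ hm

-- ===== VERDICT (by name: the statement is the Claim_ definition above) =====
theorem ensure_bcn_second_spec : Claim_equal_ensure_bcn_second := by
  intro participants default_second _
  unfold Spec_ensure_bcn_second
  exact ensure_bcn_second_eq participants default_second
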